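-- pv_equiv track=rewrite | github.com/RamChandra1528/DAA_Assignments | Assignment_5_Greedy_Algorithm/Q28.py | minJumpsToGroup
-- ===== SOURCE A (Python) =====
-- def minJumpsToGroup(S):
--     MOD = 10**9 + 7
--
--     # Extract the positions of all 'x'
--     positions = [i for i, char in enumerate(S) if char == 'x']
--
--     if not positions:
--         return 0  # No 'x' in the string
--
--     # Find the median position
--     n = len(positions)
--     median_index = n // 2
--     median = positions[median_index]
--
--     # Calculate the total number of jumps
--     total_jumps = 0
--     for i, pos in enumerate(positions):
--         # Calculate the target position of 'x' relative to the median
--         target_position = median - (median_index - i)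
--         total_jumps += abs(pos - target_position)
--         total_jumps %= MOD
--
--     return total_jumps
-- ===== SOURCE B (Python) =====
-- def minJumpsToGroup(S):
--     MOD = 10**9 + 7
--     b = [pos - i for i, pos in enumerate([j for j, c in enumerate(S) if c == 'x'])]
--     n = len(b)
--     total = 0
--     for i in range(n // 2):
--         total += b[n - 1 - i] - b[i]
--     return total % MOD
-- ===== Notes on version B (the rewrite author's own statement) =====
-- stated objective: alternative
-- what changed: Replaces A's median lookup and per-element absolute-deviation loop (with a running modulo) by a two-end pairing pass over the transformed positions b[i] = pos - i, summing the n//2 outer pair gaps b[n-1-i] - b[i] and taking one final modulo; no median is computed.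
import Mathlib
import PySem

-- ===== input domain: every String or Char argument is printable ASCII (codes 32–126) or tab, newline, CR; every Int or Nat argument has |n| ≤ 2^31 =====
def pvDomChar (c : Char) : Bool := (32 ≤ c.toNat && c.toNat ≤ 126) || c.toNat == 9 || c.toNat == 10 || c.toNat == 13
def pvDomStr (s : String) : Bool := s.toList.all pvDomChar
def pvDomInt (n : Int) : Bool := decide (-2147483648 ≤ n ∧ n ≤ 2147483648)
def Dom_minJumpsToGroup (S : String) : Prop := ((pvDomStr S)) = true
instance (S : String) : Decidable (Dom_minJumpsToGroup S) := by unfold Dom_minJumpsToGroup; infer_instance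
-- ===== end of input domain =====

-- B replaces A's median-and-deviation loop (running modulo each iteration) by a pairing pass
-- over the transformed positions b[i] = pos_i - i, summing the outer pair gaps b[n-1-i] - b[i]
-- with one final modulo; objective: alternative decomposition, no median lookup.


-- ===== PORT A =====
-- positions[median_index] is always in range (0 ≤ n//2 < n when positions ≠ []),
-- so Python's positions[median_index] is ported as pyGetD with an unreachable default.
def minJumpsToGroup (S : String) : Int :=
  let MOD : Int := 1000000007
  let positions : List Int :=
    ((PySem.List.enumerate S.toList 0).filter (fun p => p.2 == 'x')).map (fun p => p.1)
  if positions = [] then 0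
  else
    let n : Int := positions.length
    let medianIndex : Int := PySem.Int.floordiv n 2
    let median : Int := PySem.List.pyGetD positions medianIndex 0
    (PySem.List.enumerate positions 0).foldl
      (fun total p => PySem.Int.mod (total + |p.2 - (median - (medianIndex - p.1))|) MOD) 0

-- ===== PORT B =====
-- b[n-1-i] and b[i] are always in range (0 ≤ i < n//2 < n), ported as pyGetD with an
-- unreachable default.
def minJumpsToGroup_alt (S : String) : Int :=
  let MOD : Int := 1000000007
  let b : List Int :=
    (PySem.List.enumerate
      (((PySem.List.enumerate S.toList 0).filter (fun p => p.2 == 'x')).map (fun p => p.1)) 0).map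
      (fun p => p.2 - p.1)
  let n : Int := b.length
  let total : Int :=
    (PySem.List.pyRange 0 (PySem.Int.floordiv n 2) 1).foldl
      (fun total i => total + (PySem.List.pyGetD b (n - 1 - i) 0 - PySem.List.pyGetD b i 0)) 0
  PySem.Int.mod total MOD

-- ===== PRECONDITION & SPEC =====
def Spec_minJumpsToGroup (S : String) (out : Int) : Prop := out = minJumpsToGroup_alt S
instance (S : String) (out : Int) : Decidable (Spec_minJumpsToGroup S out) := by
  unfold Spec_minJumpsToGroup; infer_instance

-- ===== CLAIM (what is proved, stated in full; the proofs are below) =====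
def Claim_equal_minJumpsToGroup : Prop :=
  ∀ (S : String), Dom_minJumpsToGroup S → Spec_minJumpsToGroup S (minJumpsToGroup S)

-- ===== LEMMAS AND PROOFS =====

-- sum of |f i - f (n/2)| over a nondecreasing f equals the sum of the n/2 outer pair gaps
lemma pv_key_pair (f : ℕ → ℤ) (n : ℕ) (mono : ∀ i j, i ≤ j → j < n → f i ≤ f j) :
    ∑ i ∈ Finset.range n, |f i - f (n/2)| = ∑ i ∈ Finset.range (n/2), (f (n-1-i) - f i) := by
  rcases Nat.eq_zero_or_pos n with h0 | hpos
  · subst h0; simp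
  set m := n / 2 with hm
  have hmn : m < n := Nat.div_lt_self hpos (by norm_num)
  have hsplit : n = m + (n - m) := by omega
  have hL : ∑ i ∈ Finset.range n, |f i - f m|
      = ∑ i ∈ Finset.range m, (f m - f i) + ∑ i ∈ Finset.range (n - m), (f (m+i) - f m) := by
    conv_lhs => rw [hsplit, Finset.sum_range_add]
    congr 1
    · apply Finset.sum_congr rfl; intro i hi
      simp only [Finset.mem_range] at hi
      rw [abs_of_nonpos (by have := mono i m (by omega) hmn; omega)]; ring
    · apply Finset.sum_congr rfl; intro i hi
      simp only [Finset.mem_range] at hi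
      rw [abs_of_nonneg (by have := mono m (m+i) (by omega) (by omega); omega)]
  have hR : ∑ i ∈ Finset.range m, (f (n-1-i) - f i)
      = ∑ i ∈ Finset.range m, (f ((n-m)+i)) - ∑ i ∈ Finset.range m, f i := by
    rw [← Finset.sum_range_reflect (fun i => f ((n-m)+i)) m, ← Finset.sum_sub_distrib]
    apply Finset.sum_congr rfl; intro i hi
    simp only [Finset.mem_range] at hi
    congr 2
    omega
  rw [hL, hR]
  rcases Nat.even_or_odd n with ⟨k, hk⟩ | ⟨k, hk⟩
  · have h1 : n - m = m := by omega
    rw [h1]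
    simp only [Finset.sum_sub_distrib, Finset.sum_const, Finset.card_range, nsmul_eq_mul]
    ring
  · have h1 : n - m = m + 1 := by omega
    rw [h1, Finset.sum_range_succ']
    have h2 : ∀ i ∈ Finset.range m, f (m + (i+1)) - f m = f ((m+1)+i) - f m := by
      intro i _; congr 2; omega
    rw [Finset.sum_congr rfl h2]
    simp only [Finset.sum_sub_distrib, Finset.sum_const, Finset.card_range, nsmul_eq_mul, add_zero]
    ring

-- A's fold that reduces mod M every step equals one reduction of the plain sum
lemma pv_foldmod {α : Type} (g : α → ℤ) (M : ℤ) (hM : 0 < M) :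
    ∀ (l : List α) (a : ℤ),
      l.foldl (fun t x => PySem.Int.mod (t + g x) M) (PySem.Int.mod a M)
        = PySem.Int.mod (a + (l.map g).sum) M := by
  intro l
  induction l with
  | nil => intro a; simp
  | cons x xs ih =>
    intro a
    simp only [List.foldl_cons, List.map_cons, List.sum_cons]
    have hstep : PySem.Int.mod (PySem.Int.mod a M + g x) M = PySem.Int.mod (a + g x) M := by
      rw [PySem.Int.mod_eq_emod_of_pos hM, PySem.Int.mod_eq_emod_of_pos hM,
        PySem.Int.mod_eq_emod_of_pos hM, Int.emod_add_emod]
    rw [hstep, ih (a + g x)]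
    congr 1
    ring

lemma pv_foldmod0 {α : Type} (g : α → ℤ) (M : ℤ) (hM : 0 < M) (l : List α) :
    l.foldl (fun t x => PySem.Int.mod (t + g x) M) 0 = PySem.Int.mod ((l.map g).sum) M := by
  have h := pv_foldmod g M hM l 0
  rw [show PySem.Int.mod 0 M = 0 by rw [PySem.Int.mod_eq_emod_of_pos hM]; simp] at h
  simpa using h

lemma pv_sum_map_range (h : ℕ → ℤ) (n : ℕ) :
    ((List.range n).map h).sum = ∑ i ∈ Finset.range n, h i := by
  induction n with
  | zero => simp
  | succ k ih =>
    rw [List.range_succ, Finset.sum_range_succ, List.map_append, List.sum_append, ih]; simp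

lemma pv_sum_map_enumerate (h : ℤ × ℤ → ℤ) :
    ∀ (xs : List ℤ) (s : ℤ),
      ((PySem.List.enumerate xs s).map h).sum
        = ((List.range xs.length).map (fun (k : ℕ) => h (s + (k:ℤ), xs.getD k 0))).sum := by
  intro xs
  induction xs with
  | nil => intro s; simp [PySem.List.enumerate_nil]
  | cons x xs ih =>
    intro s
    rw [PySem.List.enumerate_cons, List.map_cons, List.sum_cons, ih (s+1),
      List.length_cons, List.range_succ_eq_map, List.map_cons, List.sum_cons, List.map_map]
    simp only [List.getD_cons_zero, Nat.cast_zero, add_zero]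
    congr 1
    apply congrArg
    apply List.map_congr_left
    intro k _
    simp only [Function.comp_apply, List.getD_cons_succ]
    congr 2
    push_cast
    ring

-- a strictly increasing integer list gains at least j - i between entries i and j
lemma pv_gap (P : List ℤ) (hpair : P.Pairwise (· < ·)) :
    ∀ i j, i ≤ j → j < P.length → P.getD i 0 + ((j:ℤ) - (i:ℤ)) ≤ P.getD j 0 := by
  have hlt := List.pairwise_iff_getElem.mp hpair
  intro i j hij hj
  induction j, hij using Nat.le_induction with
  | base => simp
  | succ j hij ih =>
    have hj' : j < P.length := by omega
    have h1 := hlt j (j+1) hj' hj (by omega)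
    have h2 := ih hj'
    rw [List.getD_eq_getElem _ _ hj'] at h2
    rw [List.getD_eq_getElem _ _ hj]
    push_cast
    omega

theorem pv_main (S : String) : minJumpsToGroup S = minJumpsToGroup_alt S := by
  have hM : (0:ℤ) < 1000000007 := by norm_num
  set P : List ℤ :=
    ((PySem.List.enumerate S.toList 0).filter (fun p => p.2 == 'x')).map (fun p => p.1) with hP
  set n : ℕ := P.length with hn
  set m : ℕ := n / 2 with hm
  set g : ℕ → ℤ := fun k => P.getD k 0 - (k:ℤ) with hg
  have hpair : P.Pairwise (· < ·) := by
    rw [hP, List.pairwise_map]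
    exact (PySem.List.pairwise_lt_enumerate S.toList 0).filter _
  have hmono : ∀ i j, i ≤ j → j < n → g i ≤ g j := by
    intro i j hij hj
    have := pv_gap P hpair i j hij (by omega)
    simp only [hg]
    omega
  have hfd : PySem.Int.floordiv ((n:ℕ):ℤ) 2 = ((m:ℕ):ℤ) := by
    rw [hm]; exact_mod_cast PySem.Int.floordiv_natCast n 2
  by_cases h0 : P = []
  · simp only [minJumpsToGroup, minJumpsToGroup_alt, ← hP, h0]
    simp [PySem.List.enumerate_nil]
  · have hnpos : 0 < n := by rw [hn]; exact List.length_pos_iff.mpr h0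
    have hmlt : m < n := Nat.div_lt_self hnpos (by norm_num)
    have hA : minJumpsToGroup S
        = PySem.Int.mod (∑ k ∈ Finset.range n, |g k - g m|) 1000000007 := by
      simp only [minJumpsToGroup, ← hP, ← hn]
      rw [if_neg h0, hfd, PySem.List.pyGetD_natCast]
      rw [pv_foldmod0 (fun p => |p.2 - (P.getD m 0 - (((m:ℕ):ℤ) - p.1))|) 1000000007 hM
        (PySem.List.enumerate P 0)]
      rw [pv_sum_map_enumerate (fun p => |p.2 - (P.getD m 0 - (((m:ℕ):ℤ) - p.1))|) P 0]
      rw [pv_sum_map_range]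
      congr 1
      apply Finset.sum_congr rfl
      intro k hk
      simp only [hg, zero_add]
      congr 1
      ring
    have hb : ∀ j, j < n →
        ((PySem.List.enumerate P 0).map (fun p => p.2 - p.1)).getD j 0 = g j := by
      intro j hj
      have hj' : j < ((PySem.List.enumerate P 0).map (fun p => p.2 - p.1)).length := by
        simp [PySem.List.length_enumerate]; omega
      rw [List.getD_eq_getElem _ _ hj', List.getElem_map,
        PySem.List.getElem_enumerate _ _ j (by simp [PySem.List.length_enumerate]; omega)]
      simp only [hg]
      rw [List.getD_eq_getElem _ _ (show j < P.length by omega)]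
      ring
    have hB : minJumpsToGroup_alt S
        = PySem.Int.mod (∑ i ∈ Finset.range m, (g (n-1-i) - g i)) 1000000007 := by
      simp only [minJumpsToGroup_alt, ← hP]
      have hlen : ((PySem.List.enumerate P 0).map (fun p => p.2 - p.1)).length = n := by
        simp [PySem.List.length_enumerate, hn]
      rw [hlen, hfd, PySem.List.pyRange_zero, Int.toNat_natCast]
      rw [List.foldl_map, PySem.List.foldl_add]
      rw [zero_add]
      congr 1
      rw [pv_sum_map_range]
      apply Finset.sum_congr rfl
      intro k hk
      simp only [Finset.mem_range] at hk
      have hc1 : ((n:ℕ):ℤ) - 1 - ((k:ℕ):ℤ) = (((n-1-k : ℕ)):ℤ) := by omega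
      rw [hc1, PySem.List.pyGetD_natCast, PySem.List.pyGetD_natCast,
        hb (n-1-k) (by omega), hb k (by omega)]
    rw [hA, hB, pv_key_pair g n hmono, ← hm]

-- ===== VERDICT (by name: the statement is the Claim_ definition above) =====
theorem minJumpsToGroup_spec : Claim_equal_minJumpsToGroup := by
  intro S _
  unfold Spec_minJumpsToGroup
  exact pv_main S
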